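-- pv_equiv track=rewrite | github.com/mattclarke/advent_of_code_20 | day_24/day_24.py | do_tick
-- ===== SOURCE A (Python) =====
-- neighbours = [(2,0), (1, -1), (-1, -1), (-2, 0), (-1, 1), (1, 1)]
--
-- def do_tick(board):
--     new_board = set()
--     for x in range(-200, 200):
--         for y in range(-200, 200):
--             num = 0
--             for n in neighbours:
--                 nx = x + n[0]
--                 ny = y + n[1]
--                 if (nx, ny) in board:
--                     num += 1
--             if (x, y) in board:
--                 if num in [1,2]:
--                     new_board.add((x, y))
--             else:
--                 if num == 2:
--                     new_board.add((x, y))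
--     return new_board
-- ===== SOURCE B (Python) =====
-- neighbours = [(2, 0), (1, -1), (-1, -1), (-2, 0), (-1, 1), (1, 1)]
--
-- def do_tick(board):
--     # Sparse tick: only black tiles and their neighbours can be black next turn,
--     # so tally candidates from the board instead of scanning the fixed 400x400 window.
--     black = set(board)
--     cands = set()
--     for t in black:
--         cands.add(t)
--         for n in neighbours:
--             cands.add((t[0] + n[0], t[1] + n[1]))
--     new_board = set()
--     for (x, y) in sorted(cands):
--         if -200 <= x < 200 and -200 <= y < 200:
--             num = sum(1 for n in neighbours if (x + n[0], y + n[1]) in black)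
--             if num == 2 or (num == 1 and (x, y) in black):
--                 new_board.add((x, y))
--     return new_board
-- ===== Notes on version B (the rewrite author's own statement) =====
-- stated objective: faster
-- what changed: Replaces the fixed 400x400 window scan with list membership per cell by a sparse pass: a hash set of black tiles, a candidate set of black tiles and their neighbours, and one clipped filter over the candidates.
import Mathlib
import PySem

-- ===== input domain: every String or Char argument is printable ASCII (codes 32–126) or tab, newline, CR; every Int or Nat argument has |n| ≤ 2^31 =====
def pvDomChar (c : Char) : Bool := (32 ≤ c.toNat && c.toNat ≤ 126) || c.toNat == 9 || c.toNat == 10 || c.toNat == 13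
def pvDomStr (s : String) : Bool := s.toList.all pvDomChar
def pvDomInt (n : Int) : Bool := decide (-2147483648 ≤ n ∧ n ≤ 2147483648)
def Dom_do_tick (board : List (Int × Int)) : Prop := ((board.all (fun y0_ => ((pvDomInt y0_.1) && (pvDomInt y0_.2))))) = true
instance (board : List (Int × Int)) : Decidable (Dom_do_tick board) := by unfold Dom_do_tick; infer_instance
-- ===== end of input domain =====

-- B replaces A's fixed 400x400 window scan (with list membership per cell) by a sparse pass over
-- the black tiles and their neighbours (hash sets + one clipped filtered pass over the candidates).


-- ===== PORT A =====
-- module-level constant 'neighbours' (shared by both Pythons)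
def pyNeighbours : List (Int × Int) := [(2, 0), (1, -1), (-1, -1), (-2, 0), (-1, 1), (1, 1)]

def do_tick (board : List (Int × Int)) : List (Int × Int) :=
  (PySem.List.pyRange (-200) 200 1).foldl (fun new_board x =>
    (PySem.List.pyRange (-200) 200 1).foldl (fun new_board y =>
      let num : Int := pyNeighbours.foldl (fun num n =>
        if (x + n.1, y + n.2) ∈ board then num + 1 else num) 0
      if (x, y) ∈ board then
        (if num ∈ ([1, 2] : List Int) then PySem.Set.add new_board (x, y) else new_board)
      else
        (if num = 2 then PySem.Set.add new_board (x, y) else new_board)) new_board)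
    PySem.Set.empty

-- ===== PORT B =====
def do_tick_alt (board : List (Int × Int)) : List (Int × Int) :=
  let black : PySem.Set (Int × Int) := PySem.Set.ofList board
  let cands : PySem.Set (Int × Int) :=
    black.foldl (fun cands t =>
      pyNeighbours.foldl (fun cands n => PySem.Set.add cands (t.1 + n.1, t.2 + n.2))
        (PySem.Set.add cands t)) PySem.Set.empty
  (PySem.List.sorted2 cands Prod.fst Prod.snd).foldl (fun new_board p =>
    if -200 ≤ p.1 ∧ p.1 < 200 ∧ -200 ≤ p.2 ∧ p.2 < 200 then
      let num : Int := (pyNeighbours.countP (fun n => decide ((p.1 + n.1, p.2 + n.2) ∈ black)) : Nat)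
      if num = 2 ∨ (num = 1 ∧ (p.1, p.2) ∈ black) then PySem.Set.add new_board p else new_board
    else new_board) PySem.Set.empty

-- ===== PRECONDITION & SPEC =====
def Spec_do_tick (board : List (Int × Int)) (out : List (Int × Int)) : Prop := out = do_tick_alt board
instance (board : List (Int × Int)) (out : List (Int × Int)) : Decidable (Spec_do_tick board out) := by unfold Spec_do_tick; infer_instance

-- ===== CLAIM (what is proved, stated in full; the proofs are below) =====
def Claim_equal_do_tick : Prop := ∀ (board : List (Int × Int)), Dom_do_tick board → Spec_do_tick board (do_tick board)

-- ===== LEMMAS AND PROOFS =====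

-- lexicographic strict order on cells (the order of A's scan)
abbrev lexlt (p q : Int × Int) : Prop := p.1 < q.1 ∨ (p.1 = q.1 ∧ p.2 < q.2)

-- the 400x400 window A scans
abbrev window (p : Int × Int) : Prop := -200 ≤ p.1 ∧ p.1 < 200 ∧ -200 ≤ p.2 ∧ p.2 < 200

-- number of black neighbours of a cell
def numOf (board : List (Int × Int)) (p : Int × Int) : Nat :=
  pyNeighbours.countP (fun n => decide ((p.1 + n.1, p.2 + n.2) ∈ board))

-- the survive/birth rule both programs apply to a cell
abbrev condA (board : List (Int × Int)) (p : Int × Int) : Prop :=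
  (p ∈ board ∧ (numOf board p = 1 ∨ numOf board p = 2)) ∨ (p ∉ board ∧ numOf board p = 2)

def gridList : List (Int × Int) :=
  (PySem.List.pyRange (-200) 200 1).flatMap
    (fun x => (PySem.List.pyRange (-200) 200 1).map (fun y => (x, y)))

def encode (p : Int × Int) : Int := p.1 * 8589934592 + p.2

def blackOf (board : List (Int × Int)) : List (Int × Int) := PySem.Set.ofList board

def candsOf (board : List (Int × Int)) : List (Int × Int) :=
  (blackOf board).foldl (fun cands t =>
    pyNeighbours.foldl (fun cands n => PySem.Set.add cands (t.1 + n.1, t.2 + n.2))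
      (PySem.Set.add cands t)) PySem.Set.empty

-- generic: a conditional-add fold over a duplicate-free list disjoint from acc is acc ++ filter
theorem foldl_addIf {α : Type} [BEq α] [LawfulBEq α] (P : α → Prop) [DecidablePred P]
    (L acc : List α) (hnd : L.Nodup) (hdis : ∀ a ∈ L, a ∉ acc) :
    L.foldl (fun s p => if P p then PySem.Set.add s p else s) acc
      = acc ++ L.filter (fun p => decide (P p)) := by
  induction L generalizing acc with
  | nil => simp
  | cons a L ih =>
    simp only [List.foldl_cons, List.filter_cons]
    rcases List.nodup_cons.mp hnd with ⟨ha, hndL⟩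
    by_cases hP : P a
    · rw [if_pos hP, PySem.Set.add_of_not_mem (hdis a (by simp))]
      have hdis' : ∀ b ∈ L, b ∉ acc ++ [a] := by
        intro b hb
        simp only [List.mem_append, List.mem_singleton]
        rintro (h | rfl)
        · exact hdis b (by simp [hb]) h
        · exact ha hb
      rw [ih _ hndL hdis']
      simp [hP]
    · rw [if_neg hP, ih _ hndL (fun b hb => hdis b (by simp [hb]))]
      simp [hP]

theorem pairwise_grid : gridList.Pairwise lexlt := by
  unfold gridList
  rw [List.pairwise_flatMap]
  constructor
  · intro a _
    refine List.Pairwise.map _ ?_ (PySem.List.pairwise_lt_pyRange_one (-200) 200)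
    intro x y hxy; exact Or.inr ⟨rfl, hxy⟩
  · refine (PySem.List.pairwise_lt_pyRange_one (-200) 200).imp ?_
    intro x y hxy p hp q hq
    simp only [List.mem_map] at hp hq
    obtain ⟨_, _, rfl⟩ := hp; obtain ⟨_, _, rfl⟩ := hq
    exact Or.inl hxy

theorem mem_grid (p : Int × Int) : p ∈ gridList ↔ window p := by
  unfold gridList window
  simp [List.mem_flatMap, PySem.List.mem_pyRange_one]
  constructor
  · rintro ⟨x, hx, y, hy, rfl⟩; exact ⟨hx.1, hx.2, hy.1, hy.2⟩
  · rintro ⟨h1, h2, h3, h4⟩; exact ⟨p.1, ⟨h1, h2⟩, p.2, ⟨h3, h4⟩, rfl⟩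

theorem nodup_grid : gridList.Nodup :=
  pairwise_grid.imp (fun h => by rcases h with h | ⟨h1, h2⟩ <;> (intro he; subst he; omega))

-- A's per-cell step is the uniform rule
theorem cell_step (board : List (Int × Int)) (x y : Int) (nb : List (Int × Int)) :
    (let num : Int := pyNeighbours.foldl (fun num n =>
        if (x + n.1, y + n.2) ∈ board then num + 1 else num) 0
      if (x, y) ∈ board then
        (if num ∈ ([1, 2] : List Int) then PySem.Set.add nb (x, y) else nb)
      else
        (if num = 2 then PySem.Set.add nb (x, y) else nb))
    = if condA board (x, y) then PySem.Set.add nb (x, y) else nb := by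
  have hnum : pyNeighbours.foldl (fun num n =>
      if (x + n.1, y + n.2) ∈ board then num + 1 else num) (0 : Int)
      = (numOf board (x, y) : Int) := by
    rw [PySem.List.foldl_ite_add_one]
    simp [numOf]
  simp only [hnum]
  by_cases hm : (x, y) ∈ board
  · simp only [if_pos hm, List.mem_cons, List.not_mem_nil, or_false]
    by_cases h12 : numOf board (x, y) = 1 ∨ numOf board (x, y) = 2
    · rw [if_pos (by omega), if_pos (show condA board (x, y) from Or.inl ⟨hm, h12⟩)]
    · rw [if_neg (by omega), if_neg (by simp [condA, hm]; omega)]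
  · simp only [if_neg hm]
    by_cases h2 : numOf board (x, y) = 2
    · rw [if_pos (by omega), if_pos (show condA board (x, y) from Or.inr ⟨hm, h2⟩)]
    · rw [if_neg (by omega), if_neg (by simp [condA, hm]; omega)]

theorem A_eq (board : List (Int × Int)) :
    do_tick board = gridList.filter (fun p => decide (condA board p)) := by
  have hf := foldl_addIf (condA board) gridList [] nodup_grid (by simp)
  rw [List.nil_append] at hf
  rw [← hf]
  unfold do_tick gridList
  rw [List.foldl_flatMap]
  apply PySem.List.foldl_congr_mem
  intro acc x _
  rw [List.foldl_map]
  apply PySem.List.foldl_congr_mem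
  intro nb y _
  exact cell_step board x y nb

-- membership in the candidate-collecting fold
theorem mem_candsFold (L : List (Int × Int)) (acc : List (Int × Int)) (p : Int × Int) :
    p ∈ L.foldl (fun cands t =>
      pyNeighbours.foldl (fun cands n => PySem.Set.add cands (t.1 + n.1, t.2 + n.2))
        (PySem.Set.add cands t)) acc
    ↔ p ∈ acc ∨ ∃ t ∈ L, p = t ∨ ∃ n ∈ pyNeighbours, p = (t.1 + n.1, t.2 + n.2) := by
  induction L generalizing acc with
  | nil => simp
  | cons a L ih =>
    rw [List.foldl_cons, ih, PySem.Set.mem_foldl_add, PySem.Set.mem_add]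
    simp only [List.mem_cons]
    constructor
    · rintro (((h | h) | h) | h)
      · exact Or.inl h
      · exact Or.inr ⟨a, Or.inl rfl, Or.inl h⟩
      · exact Or.inr ⟨a, Or.inl rfl, Or.inr h⟩
      · obtain ⟨t, ht, h⟩ := h; exact Or.inr ⟨t, Or.inr ht, h⟩
    · rintro (h | ⟨t, (rfl | ht), h⟩)
      · exact Or.inl (Or.inl (Or.inl h))
      · rcases h with h | h
        · exact Or.inl (Or.inl (Or.inr h))
        · exact Or.inl (Or.inr h)
      · exact Or.inr ⟨t, ht, h⟩

theorem nodup_candsFold (L : List (Int × Int)) (acc : List (Int × Int)) (hacc : acc.Nodup) :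
    (L.foldl (fun cands t =>
      pyNeighbours.foldl (fun cands n => PySem.Set.add cands (t.1 + n.1, t.2 + n.2))
        (PySem.Set.add cands t)) acc).Nodup := by
  induction L generalizing acc with
  | nil => exact hacc
  | cons a L ih =>
    rw [List.foldl_cons]
    refine ih _ ?_
    have h1 : (PySem.Set.add acc a).Nodup := PySem.Set.nodup_add acc a hacc
    clear ih
    generalize PySem.Set.add acc a = s at h1 ⊢
    induction pyNeighbours generalizing s with
    | nil => exact h1
    | cons n ns ihn => exact ihn _ (PySem.Set.nodup_add s (a.1 + n.1, a.2 + n.2) h1)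

theorem mem_candsOf (board : List (Int × Int)) (p : Int × Int) :
    p ∈ candsOf board ↔ p ∈ board ∨ ∃ t ∈ board, ∃ n ∈ pyNeighbours, p = (t.1 + n.1, t.2 + n.2) := by
  unfold candsOf
  rw [mem_candsFold]
  simp only [PySem.Set.mem_ofList, blackOf, List.not_mem_nil, false_or, PySem.Set.empty]
  constructor
  · rintro ⟨t, ht, (rfl | h)⟩
    · exact Or.inl ht
    · exact Or.inr ⟨t, ht, h⟩
  · rintro (h | ⟨t, ht, h⟩)
    · exact ⟨p, h, Or.inl rfl⟩
    · exact ⟨t, ht, Or.inr h⟩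

theorem nodup_candsOf (board : List (Int × Int)) : (candsOf board).Nodup :=
  nodup_candsFold _ _ (by simp [PySem.Set.empty])

theorem bound_candsOf (board : List (Int × Int)) (hdom : Dom_do_tick board) :
    ∀ p ∈ candsOf board, (-2147483650 ≤ p.1 ∧ p.1 ≤ 2147483650) ∧
      (-2147483650 ≤ p.2 ∧ p.2 ≤ 2147483650) := by
  have hb : ∀ t ∈ board, (-2147483648 ≤ t.1 ∧ t.1 ≤ 2147483648) ∧
      (-2147483648 ≤ t.2 ∧ t.2 ≤ 2147483648) := by
    intro t ht
    have := (List.all_eq_true.mp hdom) t ht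
    simp only [pvDomInt, Bool.and_eq_true, decide_eq_true_eq] at this
    exact this
  have hn : ∀ n ∈ pyNeighbours, (-2 ≤ n.1 ∧ n.1 ≤ 2) ∧ (-2 ≤ n.2 ∧ n.2 ≤ 2) := by decide
  intro p hp
  rcases (mem_candsOf board p).mp hp with h | ⟨t, ht, n, hnm, rfl⟩
  · have := hb p h; omega
  · have h1 := hb t ht; have h2 := hn n hnm
    constructor <;> constructor <;> simp <;> omega

theorem insertBy_congr {α : Type} (b₁ b₂ : α → α → Bool) (x : α) (acc : List α)
    (h : ∀ b ∈ acc, b₁ x b = b₂ x b) :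
    PySem.List.insertBy b₁ x acc = PySem.List.insertBy b₂ x acc := by
  induction acc with
  | nil => rfl
  | cons a l ih =>
    simp only [PySem.List.insertBy]
    rw [h a (by simp)]
    by_cases hc : b₂ x a = true
    · simp [hc]
    · simp only [Bool.not_eq_true] at hc
      simp [hc, ih (fun b hb => h b (by simp [hb]))]

theorem foldl_insertBy_congr {α : Type} (b₁ b₂ : α → α → Bool) (xs acc : List α)
    (hacc : ∀ a ∈ xs, ∀ b ∈ acc, b₁ a b = b₂ a b)
    (hxs : ∀ a ∈ xs, ∀ b ∈ xs, b₁ a b = b₂ a b) :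
    xs.foldl (fun acc x => PySem.List.insertBy b₁ x acc) acc
      = xs.foldl (fun acc x => PySem.List.insertBy b₂ x acc) acc := by
  induction xs generalizing acc with
  | nil => rfl
  | cons a l ih =>
    simp only [List.foldl_cons]
    rw [insertBy_congr b₁ b₂ a acc (hacc a (by simp))]
    refine ih _ ?_ (fun x hx b hb => hxs x (by simp [hx]) b (by simp [hb]))
    intro x hx b hb
    rcases (PySem.List.mem_insertBy _ _ _ _).mp hb with rfl | hb
    · exact hxs x (by simp [hx]) b (by simp)
    · exact hacc x (by simp [hx]) b hb

-- Python's tuple sort is the sort by an injective integer key, on bounded coordinates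
theorem sorted2_eq_sorted_encode (cands : List (Int × Int))
    (hbd : ∀ p ∈ cands, (-2147483650 ≤ p.1 ∧ p.1 ≤ 2147483650) ∧
      (-2147483650 ≤ p.2 ∧ p.2 ≤ 2147483650)) :
    PySem.List.sorted2 cands Prod.fst Prod.snd = PySem.List.sorted cands encode := by
  simp only [PySem.List.sorted2, PySem.List.sorted, if_neg (by decide : ¬(false = true))]
  refine foldl_insertBy_congr _ _ cands [] (by simp) ?_
  intro a ha b hb
  have h1 := hbd a ha; have h2 := hbd b hb
  rw [Bool.eq_iff_iff]
  simp only [encode, Bool.or_eq_true, Bool.and_eq_true, Bool.not_eq_true',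
    decide_eq_true_eq, decide_eq_false_iff_not]
  omega

theorem numOf_black (board : List (Int × Int)) (p : Int × Int) :
    pyNeighbours.countP (fun n => decide ((p.1 + n.1, p.2 + n.2) ∈ blackOf board))
      = numOf board p := by
  unfold numOf
  refine List.countP_congr ?_
  intro n _
  simp [blackOf, PySem.Set.mem_ofList]

theorem nodup_sorted_cands (board : List (Int × Int)) :
    (PySem.List.sorted (candsOf board) encode).Nodup :=
  ((PySem.List.sorted_perm (candsOf board) encode false).symm.nodup (nodup_candsOf board))

theorem B_eq (board : List (Int × Int)) (hdom : Dom_do_tick board) :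
    do_tick_alt board = (PySem.List.sorted (candsOf board) encode).filter
      (fun p => decide (window p ∧ condA board p)) := by
  have h0 : do_tick_alt board
      = (PySem.List.sorted2 (candsOf board) Prod.fst Prod.snd).foldl (fun new_board p =>
          if -200 ≤ p.1 ∧ p.1 < 200 ∧ -200 ≤ p.2 ∧ p.2 < 200 then
            let num : Int := (pyNeighbours.countP
              (fun n => decide ((p.1 + n.1, p.2 + n.2) ∈ blackOf board)) : Nat)
            if num = 2 ∨ (num = 1 ∧ (p.1, p.2) ∈ blackOf board) then PySem.Set.add new_board p
            else new_board
          else new_board) PySem.Set.empty := rfl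
  rw [h0, sorted2_eq_sorted_encode _ (bound_candsOf board hdom)]
  have hbody : ∀ (nb : List (Int × Int)) (p : Int × Int),
      (if -200 ≤ p.1 ∧ p.1 < 200 ∧ -200 ≤ p.2 ∧ p.2 < 200 then
        let num : Int := (pyNeighbours.countP
          (fun n => decide ((p.1 + n.1, p.2 + n.2) ∈ blackOf board)) : Nat)
        if num = 2 ∨ (num = 1 ∧ (p.1, p.2) ∈ blackOf board) then PySem.Set.add nb p else nb
      else nb)
      = if window p ∧ condA board p then PySem.Set.add nb p else nb := by
    intro nb p
    by_cases hw : window p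
    · rw [if_pos (show -200 ≤ p.1 ∧ p.1 < 200 ∧ -200 ≤ p.2 ∧ p.2 < 200 from hw)]
      simp only [numOf_black]
      have hmb : ((p.1, p.2) ∈ blackOf board) ↔ p ∈ board := by
        simp [blackOf, PySem.Set.mem_ofList]
      have hiff : (((numOf board p : Nat) : Int) = 2 ∨
          (((numOf board p : Nat) : Int) = 1 ∧ (p.1, p.2) ∈ blackOf board))
          ↔ condA board p := by
        simp only [hmb]
        unfold condA
        by_cases hm : p ∈ board <;> simp only [hm, not_true, not_false_iff, true_and,
          false_and, and_true, and_false, or_false, false_or] <;> omega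
      exact if_congr (hiff.trans ⟨fun hc => ⟨hw, hc⟩, fun h => h.2⟩) rfl rfl
    · rw [if_neg (show ¬(-200 ≤ p.1 ∧ p.1 < 200 ∧ -200 ≤ p.2 ∧ p.2 < 200) from hw),
        if_neg (fun h => hw h.1)]
  have hf := foldl_addIf (fun p => window p ∧ condA board p)
    (PySem.List.sorted (candsOf board) encode) [] (nodup_sorted_cands board) (by simp)
  rw [List.nil_append] at hf
  rw [← hf]
  apply PySem.List.foldl_congr_mem
  intro acc p _
  exact hbody acc p

-- sparsity: a cell that is black next tick is a black tile or a neighbour of one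
theorem cond_mem_cands (board : List (Int × Int)) (p : Int × Int)
    (h : condA board p) : p ∈ candsOf board := by
  rw [mem_candsOf]
  rcases h with ⟨hm, _⟩ | ⟨hm, h2⟩
  · exact Or.inl hm
  · have hpos : 0 < numOf board p := by omega
    obtain ⟨n, hn, hpred⟩ := List.countP_pos_iff.mp hpos
    simp only [decide_eq_true_eq] at hpred
    refine Or.inr ⟨(p.1 + n.1, p.2 + n.2), hpred, (-n.1, -n.2), ?_, ?_⟩
    · have hneg : ∀ n ∈ pyNeighbours, ((-n.1, -n.2) : Int × Int) ∈ pyNeighbours := by decide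
      exact hneg n hn
    · ext <;> simp

theorem pairwise_sorted_cands (board : List (Int × Int)) (hdom : Dom_do_tick board) :
    (PySem.List.sorted (candsOf board) encode).Pairwise lexlt := by
  have hb := bound_candsOf board hdom
  have h1 := PySem.List.sorted_pairwise (candsOf board) encode
  have h2 : (PySem.List.sorted (candsOf board) encode).Pairwise (· ≠ ·) :=
    nodup_sorted_cands board
  refine (h1.and h2).imp_of_mem ?_
  intro a b ha hb'
  have hba := hb a ((PySem.List.mem_sorted _ _ _ _).mp ha)
  have hbb := hb b ((PySem.List.mem_sorted _ _ _ _).mp hb')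
  rintro ⟨hle, hne⟩
  have hcomp : a.1 ≠ b.1 ∨ a.2 ≠ b.2 := by
    by_contra hcon
    rw [not_or] at hcon
    simp only [not_not] at hcon
    exact hne (Prod.ext hcon.1 hcon.2)
  unfold lexlt
  simp only [encode] at hle
  omega

-- ===== VERDICT (by name: the statement is the Claim_ definition above) =====
theorem do_tick_spec : Claim_equal_do_tick := by
  intro board hdom
  unfold Spec_do_tick
  rw [A_eq, B_eq board hdom]
  refine List.Perm.eq_of_pairwise ?_ (pairwise_grid.filter _)
    ((pairwise_sorted_cands board hdom).filter _) ?_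
  · intro a b _ _ h1 h2
    unfold lexlt at h1 h2
    obtain ⟨a1, a2⟩ := a; obtain ⟨b1, b2⟩ := b
    simp only [Prod.mk.injEq]
    constructor <;> omega
  · rw [List.perm_ext_iff_of_nodup (nodup_grid.filter _) ((nodup_sorted_cands board).filter _)]
    intro p
    simp only [List.mem_filter, mem_grid, decide_eq_true_eq, PySem.List.mem_sorted]
    constructor
    · rintro ⟨hw, hc⟩
      exact ⟨cond_mem_cands board p hc, hw, hc⟩
    · rintro ⟨_, hw, hc⟩
      exact ⟨hw, hc⟩
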